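-- pv_equiv track=rewrite | github.com/Sefaria/Machine-Learning | torah_ner/scripts/output_model_test_predictions.py | wrap_string_with_html_tag
-- ===== SOURCE A (Python) =====
-- def wrap_string_with_html_tag(base_string, tag_tuples, html_tag_open, html_tag_close):
--     # Sort the tag tuples in descending order of end index
--     tag_tuples = sorted(tag_tuples, key=lambda x: x[1], reverse=True)
--
--     # Iterate over each tag tuple
--     for start_index, end_index in tag_tuples:
--         # Construct the opening and closing tags
--         opening_tag = html_tag_open
--         closing_tag = html_tag_close
--
--         # Insert the closing tag at the end index, and the opening tag at the start index
--         base_string = base_string[:end_index] + closing_tag + base_string[end_index:]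
--         base_string = base_string[:start_index] + opening_tag + base_string[start_index:]
--
--     # Return the modified string
--     return base_string
-- ===== SOURCE B (Python) =====
-- def _clamp(i, n):
--     # Python slice-bound clamping: negative counts from the end, then clamp to [0, n]
--     if i < 0:
--         i = n + i
--     if i < 0:
--         return 0
--     if i > n:
--         return n
--     return i
--
-- def _splice(pieces, p, tag):
--     # insert tag at absolute character position p (0 <= p <= total length) into the piece list
--     i = 0
--     while i < len(pieces) and p > len(pieces[i]):
--         p -= len(pieces[i])
--         i += 1
--     if i == len(pieces):
--         pieces.append(tag)
--     else:
--         seg = pieces[i]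
--         pieces[i:i+1] = [seg[:p], tag, seg[p:]]
--
-- def wrap_string_with_html_tag(base_string, tag_tuples, html_tag_open, html_tag_close):
--     pieces = [base_string]
--     total = len(base_string)
--     for start_index, end_index in sorted(tag_tuples, key=lambda x: x[1], reverse=True):
--         _splice(pieces, _clamp(end_index, total), html_tag_close)
--         total += len(html_tag_close)
--         _splice(pieces, _clamp(start_index, total), html_tag_open)
--         total += len(html_tag_open)
--     return "".join(pieces)
-- ===== Notes on version B (the rewrite author's own statement) =====
-- stated objective: faster
-- what changed: B replaces A's per-tag full-string slicing (each insert copies the whole string) by a piece-list (rope-like) structure: each tag insertion splits one piece at a clamped absolute position, and the string is joined once at the end, so the base string is never recopied per tag.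
import Mathlib
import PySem

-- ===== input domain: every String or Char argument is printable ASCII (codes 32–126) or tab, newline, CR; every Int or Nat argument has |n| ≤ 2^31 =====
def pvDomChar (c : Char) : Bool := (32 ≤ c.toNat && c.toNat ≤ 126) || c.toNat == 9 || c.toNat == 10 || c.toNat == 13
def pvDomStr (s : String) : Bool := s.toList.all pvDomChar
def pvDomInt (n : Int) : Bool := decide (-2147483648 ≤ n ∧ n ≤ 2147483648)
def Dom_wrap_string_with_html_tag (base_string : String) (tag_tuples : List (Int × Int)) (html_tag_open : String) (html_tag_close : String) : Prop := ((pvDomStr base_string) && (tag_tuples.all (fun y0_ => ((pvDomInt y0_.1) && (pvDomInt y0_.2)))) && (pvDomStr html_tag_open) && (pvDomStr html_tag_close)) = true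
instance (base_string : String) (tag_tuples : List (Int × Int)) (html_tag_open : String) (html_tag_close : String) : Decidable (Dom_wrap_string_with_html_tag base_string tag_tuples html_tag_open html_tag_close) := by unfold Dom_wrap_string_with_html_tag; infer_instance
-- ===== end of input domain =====

-- B replaces A's per-tag whole-string slicing by a piece-list (rope-like) splice with one final join; equivalence is proved on all inputs (both are total).

-- ===== PORT A =====
-- A's repeated line  s[:i] + tag + s[i:]  (Python slice semantics via PySem.List.slice)
def pvInsertA (s : List Char) (i : Int) (tag : List Char) : List Char :=
  PySem.List.slice s none (some i) ++ tag ++ PySem.List.slice s (some i) none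

def wrap_string_with_html_tag (base_string : String) (tag_tuples : List (Int × Int)) (html_tag_open : String) (html_tag_close : String) : String :=
  -- tag_tuples = sorted(tag_tuples, key=lambda x: x[1], reverse=True); then the for-loop as a foldl over the string
  let tts := PySem.List.sorted tag_tuples (fun x => x.2) true
  String.ofList (tts.foldl
    (fun s p => pvInsertA (pvInsertA s p.2 html_tag_close.toList) p.1 html_tag_open.toList)
    base_string.toList)

-- ===== PORT B =====
-- B's _clamp(i, n): Python slice-bound clamping done explicitly
def pvClamp (i : Int) (n : Int) : Int :=
  let j := if i < 0 then n + i else i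
  if j < 0 then 0 else if j > n then n else j

-- B's _splice: walk the piece list, split one piece at position p (B only calls it with 0 ≤ p ≤ total)
def pvSplice (pieces : List (List Char)) (p : Int) (tag : List Char) : List (List Char) :=
  match pieces with
  | [] => [tag]                                     -- i == len(pieces): append
  | seg :: rest =>
      if p > (seg.length : Int) then seg :: pvSplice rest (p - seg.length) tag
      else seg.take p.toNat :: tag :: seg.drop p.toNat :: rest   -- pieces[i:i+1] = [seg[:p], tag, seg[p:]]

-- B's loop body: splice close tag, bump total, splice open tag, bump total
def pvStepB (op cl : List Char) (st : List (List Char) × Int) (p : Int × Int) : List (List Char) × Int :=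
  let pieces1 := pvSplice st.1 (pvClamp p.2 st.2) cl
  let total1 := st.2 + (cl.length : Int)
  (pvSplice pieces1 (pvClamp p.1 total1) op, total1 + (op.length : Int))

def wrap_string_with_html_tag_alt (base_string : String) (tag_tuples : List (Int × Int)) (html_tag_open : String) (html_tag_close : String) : String :=
  let fin := (PySem.List.sorted tag_tuples (fun x => x.2) true).foldl
    (pvStepB html_tag_open.toList html_tag_close.toList)
    ([base_string.toList], (base_string.toList.length : Int))
  String.ofList fin.1.flatten           -- "".join(pieces)

-- ===== PRECONDITION & SPEC =====
def Spec_wrap_string_with_html_tag (base_string : String) (tag_tuples : List (Int × Int)) (html_tag_open : String) (html_tag_close : String) (out : String) : Prop := out = wrap_string_with_html_tag_alt base_string tag_tuples html_tag_open html_tag_close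
instance (base_string : String) (tag_tuples : List (Int × Int)) (html_tag_open : String) (html_tag_close : String) (out : String) : Decidable (Spec_wrap_string_with_html_tag base_string tag_tuples html_tag_open html_tag_close out) := by unfold Spec_wrap_string_with_html_tag; infer_instance

-- ===== CLAIM (what is proved, stated in full; the proofs are below) =====
def Claim_equal_wrap_string_with_html_tag : Prop := ∀ (base_string : String) (tag_tuples : List (Int × Int)) (html_tag_open : String) (html_tag_close : String), Dom_wrap_string_with_html_tag base_string tag_tuples html_tag_open html_tag_close → Spec_wrap_string_with_html_tag base_string tag_tuples html_tag_open html_tag_close (wrap_string_with_html_tag base_string tag_tuples html_tag_open html_tag_close)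

-- ===== LEMMAS AND PROOFS =====

-- B's explicit clamp equals the clamp Python's slice bounds perform
theorem pvClamp_eq_clampIdx (i : Int) (n : Nat) :
    pvClamp i (n : Int) = ((PySem.List.clampIdx n i : Nat) : Int) := by
  simp only [pvClamp, PySem.List.clampIdx]
  split_ifs <;> omega

-- A's insert expressed as take/drop at the clamped position
theorem pvInsertA_eq (s : List Char) (i : Int) (tag : List Char) :
    pvInsertA s i tag
      = s.take (PySem.List.clampIdx s.length i) ++ tag ++ s.drop (PySem.List.clampIdx s.length i) := by
  have hto : PySem.List.slice s none (some i) = s.take (PySem.List.clampIdx s.length i) := by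
    simp [PySem.List.slice, PySem.List.clampIdx]
  rw [pvInsertA, hto, PySem.List.slice_some_none]

theorem length_pvInsertA (s : List Char) (i : Int) (tag : List Char) :
    (pvInsertA s i tag).length = s.length + tag.length := by
  have h := PySem.List.clampIdx_le s.length i
  simp [pvInsertA_eq]
  omega

-- splicing a tag at position p ≤ total length into the piece list = inserting it into the joined string
theorem pvSplice_flatten (tag : List Char) :
    ∀ (ps : List (List Char)) (p : Nat), p ≤ ps.flatten.length →
      (pvSplice ps (p : Int) tag).flatten = ps.flatten.take p ++ tag ++ ps.flatten.drop p := by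
  intro ps
  induction ps with
  | nil =>
      intro p hp
      simp at hp
      subst hp
      simp [pvSplice]
  | cons seg rest ih =>
      intro p hp
      simp only [List.flatten_cons, List.length_append] at hp
      by_cases hgt : seg.length < p
      · have hrec : ((p : Int) - (seg.length : Int)) = ((p - seg.length : Nat) : Int) := by omega
        have hrest : p - seg.length ≤ rest.flatten.length := by omega
        simp only [pvSplice]
        rw [if_pos (by exact_mod_cast hgt), hrec, List.flatten_cons,
          ih (p - seg.length) hrest]
        simp [List.take_append, List.drop_append,
          List.take_of_length_le (show seg.length ≤ p by omega),
          List.drop_eq_nil_of_le (show seg.length ≤ p by omega)]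
      · rw [not_lt] at hgt
        have h1 : p - seg.length = 0 := by omega
        simp only [pvSplice]
        rw [if_neg (by exact_mod_cast not_lt.mpr hgt)]
        simp only [Int.toNat_natCast, List.flatten_cons]
        simp [List.take_append, List.drop_append, h1]

-- one B step on a faithful state produces a faithful state for A's one step
theorem pvStepB_correct (op cl : List Char) (ps : List (List Char)) (total : Int)
    (s : List Char) (p : Int × Int) (h1 : ps.flatten = s) (h2 : total = (s.length : Int)) :
    (pvStepB op cl (ps, total) p).1.flatten = pvInsertA (pvInsertA s p.2 cl) p.1 op ∧
    (pvStepB op cl (ps, total) p).2 = (((pvInsertA (pvInsertA s p.2 cl) p.1 op).length : Nat) : Int) := by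
  subst h1 h2
  have hc2 := PySem.List.clampIdx_le ps.flatten.length p.2
  have e1 : (pvSplice ps (((PySem.List.clampIdx ps.flatten.length p.2 : Nat) : Int)) cl).flatten
      = pvInsertA ps.flatten p.2 cl := by
    rw [pvSplice_flatten cl ps _ hc2, pvInsertA_eq]
  have hlen1 : (pvInsertA ps.flatten p.2 cl).length = ps.flatten.length + cl.length :=
    length_pvInsertA _ _ _
  have hc1 := PySem.List.clampIdx_le (pvInsertA ps.flatten p.2 cl).length p.1
  have htot : (ps.flatten.length : Int) + (cl.length : Int)
      = ((pvInsertA ps.flatten p.2 cl).length : Int) := by rw [hlen1]; push_cast; ring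
  constructor
  · show (pvSplice (pvSplice ps (pvClamp p.2 _) cl)
        (pvClamp p.1 ((ps.flatten.length : Int) + (cl.length : Int))) op).flatten = _
    rw [htot, pvClamp_eq_clampIdx p.2 ps.flatten.length,
      pvClamp_eq_clampIdx p.1 (pvInsertA ps.flatten p.2 cl).length,
      pvSplice_flatten op _ _ (by rw [e1]; exact hc1), e1,
      pvInsertA_eq (pvInsertA ps.flatten p.2 cl) p.1 op]
  · show (ps.flatten.length : Int) + (cl.length : Int) + (op.length : Int) = _
    rw [length_pvInsertA, hlen1]
    push_cast; ring

-- the fold invariant over the sorted tuple list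
theorem pvFold_correct (op cl : List Char) :
    ∀ (l : List (Int × Int)) (ps : List (List Char)) (total : Int) (s : List Char),
      ps.flatten = s → total = (s.length : Int) →
      (l.foldl (pvStepB op cl) (ps, total)).1.flatten
        = l.foldl (fun s p => pvInsertA (pvInsertA s p.2 cl) p.1 op) s := by
  intro l
  induction l with
  | nil => intro ps total s h1 h2; simpa using h1
  | cons hd tl ih =>
      intro ps total s h1 h2
      obtain ⟨e1, e2⟩ := pvStepB_correct op cl ps total s hd h1 h2
      simp only [List.foldl_cons]
      exact ih _ _ _ e1 e2

-- ===== VERDICT (by name: the statement is the Claim_ definition above) =====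
theorem wrap_string_with_html_tag_spec : Claim_equal_wrap_string_with_html_tag := by
  intro base_string tag_tuples html_tag_open html_tag_close _
  show _ = _
  unfold wrap_string_with_html_tag wrap_string_with_html_tag_alt
  simp only []
  congr 1
  exact (pvFold_correct html_tag_open.toList html_tag_close.toList
    (PySem.List.sorted tag_tuples (fun x => x.2) true)
    [base_string.toList] (base_string.toList.length : Int) base_string.toList
    (by simp) rfl).symm
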